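-- pv_equiv track=rewrite | github.com/Pacten15/Projeto-FP | Projeto 1 Jogo do galo.py | eh_posicao_livre
-- ===== SOURCE A (Python) =====
-- def eh_tabuleiro(tab):#le o tuplo principal
--     ''' Verifica se e um tabuleiro'''
--     numeros_poss = (1, -1, 0)
--     if len(tab) != 3:         # Verifica o tamanho do tuplo principal.
--             return False
--     for i in range(len(tab)): # define para i os tuplos dentro do tuplo princ.
--         if len(tab[i]) != 3:# Verifica o tamanho dos tuplos interiores.
--             return False
--         for el in tab[i]:  #define para el os elementos dos tres tuplos interiores
--             if type(el) != int:# verifica se os el dos tuple sao int.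
--                 return False
--             if el not in numeros_poss:
--                 return False
--     return True
--
-- def eh_posicao(n):#le um numero digitado pe
--     '''Verificar se o digitado e uma posicao do tabuleiro'''
--     num_disp = (1, 2, 3, 4, 5, 6, 7 ,8 ,9) # num de posicoes no tabuleiro
--     if type(n) != int:   # verificacao que o n e uma possicao
--         return False
--     else:
--         for i in range(len(num_disp)):#define para i todos os el do tuplo
--             if n == num_disp[i]: # verifica se n pertence ao tuplo
--                 return True
--         else:
--             return False
--
-- def eh_posicao_livre(tab, n):#argumentos:tabela e a posicao no tab
--     '''Verificar se o n e uma posicao livre no tabuleiro'''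
--     seq_nums = ()# acumulador para colocar os todos os numeros dos tuplos interiores
--     if eh_tabuleiro(tab) == False:# Verifica se e um tabuleiro
--         raise ValueError ('eh_posicao_livre: algum dos argumentos e invalido')
--     if eh_posicao(n) == False:# Verificar se a posicao existe
--         raise ValueError ('eh_posicao_livre: algum dos argumentos e invalido')
--     for i in range(len(tab)):
--         seq_nums += tab[i] # colocar os elementos dos tuplos interiores num so tuplo
--     if seq_nums[n-1] == 0:# verificar se o numero do tuplo e uma posicao livre
--         return True
--     else:
--         return False
-- ===== SOURCE B (Python) =====
-- def eh_tabuleiro(tab):#le o tuplo principal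
--     ''' Verifica se e um tabuleiro'''
--     numeros_poss = (1, -1, 0)
--     if len(tab) != 3:
--             return False
--     for i in range(len(tab)):
--         if len(tab[i]) != 3:
--             return False
--         for el in tab[i]:
--             if type(el) != int:
--                 return False
--             if el not in numeros_poss:
--                 return False
--     return True
--
-- def eh_posicao(n):
--     '''Verificar se o digitado e uma posicao do tabuleiro'''
--     num_disp = (1, 2, 3, 4, 5, 6, 7 ,8 ,9)
--     if type(n) != int:
--         return False
--     else:
--         for i in range(len(num_disp)):
--             if n == num_disp[i]:
--                 return True
--         else:
--             return False
--
-- def eh_posicao_livre(tab, n):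
--     '''Verificar se o n e uma posicao livre no tabuleiro'''
--     if eh_tabuleiro(tab) == False:
--         raise ValueError ('eh_posicao_livre: algum dos argumentos e invalido')
--     if eh_posicao(n) == False:
--         raise ValueError ('eh_posicao_livre: algum dos argumentos e invalido')
--     row, col = divmod(n - 1, 3)
--     return tab[row][col] == 0
-- ===== Notes on version B (the rewrite author's own statement) =====
-- stated objective: simpler
-- what changed: Drops the seq_nums accumulator loop that flattens the board into one tuple before indexing; computes row, col = divmod(n-1, 3) and reads tab[row][col] directly.
import Mathlib
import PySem

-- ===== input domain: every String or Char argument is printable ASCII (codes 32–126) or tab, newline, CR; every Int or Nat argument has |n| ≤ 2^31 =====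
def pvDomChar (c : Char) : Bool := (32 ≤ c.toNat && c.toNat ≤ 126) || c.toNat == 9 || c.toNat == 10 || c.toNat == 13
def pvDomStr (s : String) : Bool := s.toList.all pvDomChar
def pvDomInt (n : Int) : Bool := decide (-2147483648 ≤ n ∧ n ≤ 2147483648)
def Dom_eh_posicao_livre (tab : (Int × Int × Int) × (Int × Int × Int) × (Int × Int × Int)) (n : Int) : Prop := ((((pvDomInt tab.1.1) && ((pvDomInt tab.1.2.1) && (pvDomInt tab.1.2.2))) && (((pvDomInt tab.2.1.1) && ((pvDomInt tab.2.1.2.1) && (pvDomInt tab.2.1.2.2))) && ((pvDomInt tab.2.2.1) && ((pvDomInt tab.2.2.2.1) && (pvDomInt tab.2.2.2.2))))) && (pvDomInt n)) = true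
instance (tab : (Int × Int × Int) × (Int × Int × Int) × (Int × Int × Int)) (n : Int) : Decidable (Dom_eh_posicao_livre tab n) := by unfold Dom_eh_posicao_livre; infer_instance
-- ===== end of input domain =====

-- ===== PORT A =====
-- B replaces A's flatten-then-index loop by divmod row/col direct access (simpler; helpers and raise order identical).
-- A raises ValueError on an invalid board or position; those inputs are excluded by Pre_ below.
def eh_tabuleiro (tab : (Int × Int × Int) × (Int × Int × Int) × (Int × Int × Int)) : Bool :=
  -- tuple type fixes len(tab)=3 and len(tab[i])=3 and int elements; remaining check: membership in (1,-1,0)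
  ([tab.1, tab.2.1, tab.2.2]).all fun r =>
    ([r.1, r.2.1, r.2.2] : List Int).all fun el => ([1, -1, 0] : List Int).contains el

def eh_posicao (n : Int) : Bool :=
  -- loop over num_disp testing n == num_disp[i]
  ([1, 2, 3, 4, 5, 6, 7, 8, 9] : List Int).any fun i => n == i

def eh_posicao_livre (tab : (Int × Int × Int) × (Int × Int × Int) × (Int × Int × Int)) (n : Int) : Bool :=
  if eh_tabuleiro tab == false then false -- raise ValueError (outside Pre_)
  else if eh_posicao n == false then false -- raise ValueError (outside Pre_)
  else
    let seq_nums : List Int :=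
      ([tab.1, tab.2.1, tab.2.2]).foldl (fun acc r => acc ++ [r.1, r.2.1, r.2.2]) []
    match PySem.List.pyGet? seq_nums (n - 1) with
    | some v => v == 0
    | none => false

-- ===== PORT B =====
def eh_posicao_livre_alt (tab : (Int × Int × Int) × (Int × Int × Int) × (Int × Int × Int)) (n : Int) : Bool :=
  if eh_tabuleiro tab == false then false -- raise ValueError (outside Pre_)
  else if eh_posicao n == false then false -- raise ValueError (outside Pre_)
  else
    let row := PySem.Int.floordiv (n - 1) 3
    let col := PySem.Int.mod (n - 1) 3
    -- tab[row] / row-tuple[col]: conditional selection (exact here: eh_posicao guarantees 0 <= row, col <= 2)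
    let r := if row == 0 then tab.1 else if row == 1 then tab.2.1 else tab.2.2
    (if col == 0 then r.1 else if col == 1 then r.2.1 else r.2.2) == 0

-- ===== PRECONDITION & SPEC =====
-- Pre_ excludes exactly the inputs where A raises ValueError: a board entry outside {1,-1,0} or n outside 1..9.
def Pre_eh_posicao_livre (tab : (Int × Int × Int) × (Int × Int × Int) × (Int × Int × Int)) (n : Int) : Prop :=
  (∀ x ∈ [tab.1.1, tab.1.2.1, tab.1.2.2, tab.2.1.1, tab.2.1.2.1, tab.2.1.2.2,
          tab.2.2.1, tab.2.2.2.1, tab.2.2.2.2], x = 1 ∨ x = -1 ∨ x = 0) ∧ 1 ≤ n ∧ n ≤ 9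
instance (tab : (Int × Int × Int) × (Int × Int × Int) × (Int × Int × Int)) (n : Int) : Decidable (Pre_eh_posicao_livre tab n) := by unfold Pre_eh_posicao_livre; infer_instance

def pvWitness_eh_posicao_livre : ((Int × Int × Int) × (Int × Int × Int) × (Int × Int × Int)) × Int :=
  (((0, 1, -1), (0, 0, 1), (-1, 1, 0)), 4)

def Spec_eh_posicao_livre (tab : (Int × Int × Int) × (Int × Int × Int) × (Int × Int × Int)) (n : Int) (out : Bool) : Prop := out = eh_posicao_livre_alt tab n
instance (tab : (Int × Int × Int) × (Int × Int × Int) × (Int × Int × Int)) (n : Int) (out : Bool) : Decidable (Spec_eh_posicao_livre tab n out) := by unfold Spec_eh_posicao_livre; infer_instance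

-- ===== CLAIM (what is proved, stated in full; the proofs are below) =====
def Claim_equal_eh_posicao_livre : Prop := ∀ (tab : (Int × Int × Int) × (Int × Int × Int) × (Int × Int × Int)) (n : Int), Dom_eh_posicao_livre tab n → Pre_eh_posicao_livre tab n → Spec_eh_posicao_livre tab n (eh_posicao_livre tab n)

-- ===== LEMMAS AND PROOFS =====

-- ===== VERDICT (by name: the statement is the Claim_ definition above) =====
theorem eh_posicao_livre_spec : Claim_equal_eh_posicao_livre := by
  intro tab n _ hpre
  obtain ⟨⟨a, b, c⟩, ⟨d, e, f⟩, ⟨g, h, i⟩⟩ := tab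
  obtain ⟨_, hn1, hn9⟩ := hpre
  unfold Spec_eh_posicao_livre eh_posicao_livre eh_posicao_livre_alt
  interval_cases n <;>
    simp [eh_tabuleiro, eh_posicao, PySem.List.pyGet?, PySem.List.pyIdx?,
          PySem.Int.floordiv, PySem.Int.mod]
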